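-- pv_equiv track=rewrite | github.com/koehnden/dragon-lens | src/services/brand_recognition/consolidation_service.py | _find_first_entity_in_text
-- ===== SOURCE A (Python) =====
-- from typing import Dict, List, Optional, Set, Tuple, Any
--
-- def _find_first_entity_in_text(text: str, entities: List[str]) -> Optional[str]:
--     """Find the first occurring entity in the text."""
--     if not entities:
--         return None
--
--     first_pos = len(text) + 1
--     first_entity = None
--
--     for entity in entities:
--         pos = text.find(entity)
--         if pos != -1 and pos < first_pos:
--             first_pos = pos
--             first_entity = entity
--
--     return first_entity
-- ===== SOURCE B (Python) =====
-- from typing import List, Optional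
--
--
-- def _find_first_entity_in_text(text: str, entities: List[str]) -> Optional[str]:
--     """Position-major scan: walk the text left to right and return the first
--     entity (in list order) that matches at the earliest position."""
--     for i in range(len(text) + 1):
--         for entity in entities:
--             if text.startswith(entity, i):
--                 return entity
--     return None
-- ===== Notes on version B (the rewrite author's own statement) =====
-- stated objective: faster
-- what changed: Entity-major loop tracking the minimal find() position is replaced by a position-major scan of the text that returns as soon as some entity matches at the current position, so only the text prefix up to the first match is ever examined.
import Mathlib
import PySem

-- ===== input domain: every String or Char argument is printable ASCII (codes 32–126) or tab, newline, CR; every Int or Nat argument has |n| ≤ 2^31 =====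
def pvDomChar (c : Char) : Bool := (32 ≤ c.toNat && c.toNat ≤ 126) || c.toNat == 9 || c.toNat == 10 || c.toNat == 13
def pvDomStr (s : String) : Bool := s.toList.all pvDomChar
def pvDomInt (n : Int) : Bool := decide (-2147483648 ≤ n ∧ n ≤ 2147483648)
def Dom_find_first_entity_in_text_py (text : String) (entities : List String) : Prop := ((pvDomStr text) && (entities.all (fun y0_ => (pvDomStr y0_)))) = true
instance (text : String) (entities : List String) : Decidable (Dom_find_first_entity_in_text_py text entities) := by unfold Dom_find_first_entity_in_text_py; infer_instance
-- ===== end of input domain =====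

-- B replaces A's entity-major min-tracking loop over text.find() by a position-major scan of the
-- text returning the first entity matching at the earliest position (objective: alternative).

-- ===== PORT A =====
-- loop body of A's for-loop: state (first_pos, first_entity), pos = text.find(entity)
def pvStepA (text : String) (st : Int × Option String) (entity : String) : Int × Option String :=
  let pos := PySem.Str.find text entity
  if pos ≠ -1 ∧ pos < st.1 then (pos, some entity) else st

def find_first_entity_in_text_py (text : String) (entities : List String) : Option String :=
  if entities = [] then none
  else (entities.foldl (pvStepA text) (((PySem.Str.len text : Int) + 1), none)).2

-- ===== PORT B =====
-- inner 'for entity in entities: if text.startswith(entity, i): return entity';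
-- text.startswith(entity, i) for 0 ≤ i is exactly startswith of text[i:], i.e. of (toList.drop i)
def pvInnerB (tl : List Char) (i : Nat) : List String → Option String
  | [] => none
  | e :: rest => if PySem.Chars.startswith (tl.drop i) e.toList then some e else pvInnerB tl i rest

-- outer 'for i in range(len(text) + 1)' with early return
def pvOuterB (tl : List Char) (entities : List String) : List Nat → Option String
  | [] => none
  | i :: rest =>
    match pvInnerB tl i entities with
    | some e => some e
    | none => pvOuterB tl entities rest

def find_first_entity_in_text_py_alt (text : String) (entities : List String) : Option String :=
  pvOuterB text.toList entities (List.range (text.toList.length + 1))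

-- ===== PRECONDITION & SPEC =====
def Spec_find_first_entity_in_text_py (text : String) (entities : List String) (out : Option String) : Prop := out = find_first_entity_in_text_py_alt text entities
instance (text : String) (entities : List String) (out : Option String) : Decidable (Spec_find_first_entity_in_text_py text entities out) := by unfold Spec_find_first_entity_in_text_py; infer_instance

-- ===== CLAIM (what is proved, stated in full; the proofs are below) =====
def Claim_equal_find_first_entity_in_text_py : Prop := ∀ (text : String) (entities : List String), Dom_find_first_entity_in_text_py text entities → Spec_find_first_entity_in_text_py text entities (find_first_entity_in_text_py text entities)

-- ===== LEMMAS AND PROOFS =====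

-- A's fold keeps its state when no entity improves it
lemma pvFold_const (text : String) (es : List String) (p : Int) (r : Option String)
    (h : ∀ e ∈ es, ¬(PySem.Str.find text e ≠ -1 ∧ PySem.Str.find text e < p)) :
    es.foldl (pvStepA text) (p, r) = (p, r) := by
  induction es with
  | nil => rfl
  | cons e rest ih =>
    have he := h e (List.mem_cons_self ..)
    simp only [List.foldl_cons, pvStepA, if_neg he]
    exact ih (fun x hx => h x (List.mem_cons_of_mem _ hx))

-- A's fold returns the first entity of minimal (non-negative) find position
lemma pvFold_min (text : String) (estar : String) (post : List String)
    (h1 : PySem.Str.find text estar ≠ -1)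
    (hpost : ∀ e ∈ post, PySem.Str.find text e = -1 ∨ PySem.Str.find text estar ≤ PySem.Str.find text e) :
    ∀ (pre : List String) (p : Int) (r : Option String),
      PySem.Str.find text estar < p →
      (∀ e ∈ pre, PySem.Str.find text e = -1 ∨ PySem.Str.find text estar < PySem.Str.find text e) →
      (pre ++ estar :: post).foldl (pvStepA text) (p, r) = (PySem.Str.find text estar, some estar) := by
  intro pre
  induction pre with
  | nil =>
    intro p r h2 _
    simp only [List.nil_append, List.foldl_cons]
    have hstep : pvStepA text (p, r) estar = (PySem.Str.find text estar, some estar) := by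
      simp only [pvStepA]
      rw [if_pos ⟨h1, h2⟩]
    rw [hstep]
    exact pvFold_const text post _ _ (fun e he => by
      rcases hpost e he with h | h
      · exact fun hc => hc.1 h
      · exact fun hc => absurd hc.2 (not_lt.mpr h))
  | cons e pre' ih =>
    intro p r h2 hpre
    have hpre' : ∀ x ∈ pre', PySem.Str.find text x = -1 ∨ PySem.Str.find text estar < PySem.Str.find text x :=
      fun x hx => hpre x (List.mem_cons_of_mem _ hx)
    simp only [List.cons_append, List.foldl_cons]
    by_cases hc : PySem.Str.find text e ≠ -1 ∧ PySem.Str.find text e < p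
    · have hlt : PySem.Str.find text estar < PySem.Str.find text e := by
        rcases hpre e (List.mem_cons_self ..) with h | h
        · exact absurd h hc.1
        · exact h
      have hstep : pvStepA text (p, r) e = (PySem.Str.find text e, some e) := by
        simp only [pvStepA]
        rw [if_pos hc]
      rw [hstep]
      exact ih _ _ hlt hpre'
    · have hstep : pvStepA text (p, r) e = (p, r) := by
        simp only [pvStepA, if_neg hc]
      rw [hstep]
      exact ih _ _ h2 hpre'

lemma pvInnerB_eq_find? (tl : List Char) (i : Nat) (es : List String) :
    pvInnerB tl i es = es.find? (fun e => PySem.Chars.startswith (tl.drop i) e.toList) := by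
  induction es with
  | nil => rfl
  | cons e rest ih =>
    simp only [pvInnerB, List.find?]
    cases h : PySem.Chars.startswith (tl.drop i) e.toList with
    | false => simp [ih]
    | true => simp

lemma pvInnerB_eq_none_iff (tl : List Char) (i : Nat) (es : List String) :
    pvInnerB tl i es = none ↔ ∀ e ∈ es, ¬ (e.toList <+: tl.drop i) := by
  rw [pvInnerB_eq_find?, List.find?_eq_none]
  constructor
  · intro h e he hp
    exact absurd ((PySem.Chars.startswith_iff _ _).mpr hp) (by simpa using h e he)
  · intro h e he
    simp only [Bool.not_eq_true]
    rw [← Bool.not_eq_true, PySem.Chars.startswith_iff]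
    exact h e he

lemma pvInnerB_ne_none (tl : List Char) (i : Nat) (es : List String) (e : String)
    (he : e ∈ es) (hp : e.toList <+: tl.drop i) : pvInnerB tl i es ≠ none := by
  intro h
  exact (pvInnerB_eq_none_iff tl i es).mp h e he hp

lemma pvOuterB_none (tl : List Char) (es : List String) :
    ∀ is_ : List Nat, (∀ i ∈ is_, pvInnerB tl i es = none) → pvOuterB tl es is_ = none := by
  intro is_
  induction is_ with
  | nil => intro _; rfl
  | cons i rest ih =>
    intro h
    simp only [pvOuterB, h i (List.mem_cons_self ..)]
    exact ih (fun x hx => h x (List.mem_cons_of_mem _ hx))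

lemma pvOuterB_append (tl : List Char) (es : List String) (is1 is2 : List Nat)
    (h : ∀ i ∈ is1, pvInnerB tl i es = none) :
    pvOuterB tl es (is1 ++ is2) = pvOuterB tl es is2 := by
  induction is1 with
  | nil => rfl
  | cons i rest ih =>
    simp only [List.cons_append, pvOuterB, h i (List.mem_cons_self ..)]
    exact ih (fun x hx => h x (List.mem_cons_of_mem _ hx))

-- if the least matching position is m and e matches nowhere below m but somewhere, find(e) ≥ m
lemma pvFind_lower (tl : List Char) (es : List String) (m : Nat)
    (hmin : ∀ i, i < m → pvInnerB tl i es = none) (e : String) (he : e ∈ es)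
    (hne : PySem.Chars.find tl e.toList ≠ -1) :
    (m : Int) ≤ PySem.Chars.find tl e.toList ∧
      e.toList <+: tl.drop (PySem.Chars.find tl e.toList).toNat := by
  have hnn : 0 ≤ PySem.Chars.find tl e.toList := by
    have := PySem.Chars.neg_one_le_find tl e.toList
    omega
  have hspec := PySem.Chars.find_spec hnn
  refine ⟨?_, hspec.1⟩
  by_contra hlt
  have hlt' : (PySem.Chars.find tl e.toList).toNat < m := by omega
  exact pvInnerB_ne_none tl _ es e he hspec.1 (hmin _ hlt')

-- ===== VERDICT (by name: the statement is the Claim_ definition above) =====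
theorem find_first_entity_in_text_py_spec : Claim_equal_find_first_entity_in_text_py := by
  intro text entities _
  unfold Spec_find_first_entity_in_text_py
  set tl := text.toList with htl
  by_cases hex : ∃ i, pvInnerB tl i entities ≠ none
  · -- some entity matches somewhere; m is the least such position
    set m := Nat.find hex with hm
    have hmsome : pvInnerB tl m entities ≠ none := Nat.find_spec hex
    have hmin : ∀ i, i < m → pvInnerB tl i entities = none := by
      intro i hi
      by_contra h
      exact Nat.find_min hex hi h
    obtain ⟨estar, hestar⟩ : ∃ e, pvInnerB tl m entities = some e := by
      cases h : pvInnerB tl m entities with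
      | none => exact absurd h hmsome
      | some e => exact ⟨e, rfl⟩
    rw [pvInnerB_eq_find?] at hestar
    obtain ⟨hpred, pre, post, hsplit, hprenot⟩ := List.find?_eq_some_iff_append.mp hestar
    have hprefix : estar.toList <+: tl.drop m := (PySem.Chars.startswith_iff _ _).mp hpred
    have hmem : estar ∈ entities := by rw [hsplit]; simp
    -- m ≤ tl.length
    have hmle : m ≤ tl.length := by
      by_cases hnil : estar.toList = []
      · have h0 : pvInnerB tl 0 entities ≠ none :=
          pvInnerB_ne_none tl 0 entities estar hmem (by rw [hnil]; exact List.nil_prefix)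
        have : m ≤ 0 := by
          by_contra h
          exact h0 (hmin 0 (by omega))
        omega
      · have hdropne : tl.drop m ≠ [] := by
          intro h
          rw [h] at hprefix
          exact hnil (List.prefix_nil.mp hprefix)
        have := List.drop_eq_nil_iff.not.mp (by simpa using hdropne)
        omega
    -- find(estar) = m
    have hinf : estar.toList <:+: tl :=
      hprefix.isInfix.trans (List.drop_suffix m tl).isInfix
    have hne : PySem.Chars.find tl estar.toList ≠ -1 :=
      (PySem.Chars.find_ne_neg_one_iff tl estar.toList).mpr hinf
    have hnn : 0 ≤ PySem.Chars.find tl estar.toList := by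
      have := PySem.Chars.neg_one_le_find tl estar.toList
      omega
    have hspec := PySem.Chars.find_spec hnn
    have hge := (pvFind_lower tl entities m hmin estar hmem hne).1
    have hle : (PySem.Chars.find tl estar.toList).toNat ≤ m := by
      by_contra h
      exact hspec.2 m (by omega) hprefix
    have hfind : PySem.Chars.find tl estar.toList = (m : Int) := by omega
    -- A returns some estar
    have hAne : entities ≠ [] := by rw [hsplit]; simp
    have hpre : ∀ e ∈ pre, PySem.Str.find text e = -1 ∨
        PySem.Str.find text estar < PySem.Str.find text e := by
      intro e he
      by_cases h : PySem.Chars.find tl e.toList = -1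
      · left; simp [PySem.Str.find_eq, ← htl, h]
      · right
        obtain ⟨hgeE, hprefE⟩ := pvFind_lower tl entities m hmin e (by rw [hsplit]; simp [he]) h
        have hnnE : 0 ≤ PySem.Chars.find tl e.toList := by
          have := PySem.Chars.neg_one_le_find tl e.toList
          omega
        have hneqm : (PySem.Chars.find tl e.toList).toNat ≠ m := by
          intro heq
          rw [heq] at hprefE
          have h'' : PySem.Chars.startswith (List.drop m tl) e.toList = false := by
            simpa using hprenot e he
          rw [(PySem.Chars.startswith_iff _ _).mpr hprefE] at h''
          simp at h''
        simp only [PySem.Str.find_eq, ← htl, hfind]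
        omega
    have hpost : ∀ e ∈ post, PySem.Str.find text e = -1 ∨
        PySem.Str.find text estar ≤ PySem.Str.find text e := by
      intro e he
      by_cases h : PySem.Chars.find tl e.toList = -1
      · left; simp [PySem.Str.find_eq, ← htl, h]
      · right
        have hgeE := (pvFind_lower tl entities m hmin e (by rw [hsplit]; simp [he]) h).1
        simp only [PySem.Str.find_eq, ← htl, hfind]
        omega
    have hA : find_first_entity_in_text_py text entities = some estar := by
      unfold find_first_entity_in_text_py
      rw [if_neg hAne, hsplit]
      have hne' : PySem.Str.find text estar ≠ -1 := by
        simp only [PySem.Str.find_eq, ← htl]; exact hne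
      have hlt : PySem.Str.find text estar < (PySem.Str.len text : Int) + 1 := by
        simp only [PySem.Str.find_eq, ← htl, hfind, PySem.Str.len_eq]
        omega
      rw [pvFold_min text estar post hne' hpost pre _ none hlt hpre]
    -- B returns some estar
    have hB : find_first_entity_in_text_py_alt text entities = some estar := by
      unfold find_first_entity_in_text_py_alt
      rw [← htl]
      obtain ⟨k, hk⟩ : ∃ k, tl.length + 1 - m = k + 1 := ⟨tl.length - m, by omega⟩
      have hrange : List.range (tl.length + 1) =
          List.range m ++ List.map (m + ·) (List.range (k + 1)) := by
        have hsum : m + (k + 1) = tl.length + 1 := by omega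
        rw [← hsum, List.range_add]
      have hmap : List.map (m + ·) (List.range (k + 1)) =
          m :: List.map (m + ·) (List.map Nat.succ (List.range k)) := by
        rw [List.range_succ_eq_map]
        simp
      rw [hrange, hmap, pvOuterB_append tl entities _ _
        (fun i hi => hmin i (List.mem_range.mp hi))]
      have hisome : pvInnerB tl m entities = some estar := by
        rw [pvInnerB_eq_find?]; exact hestar
      simp [pvOuterB, hisome]
    rw [hA, hB]
  · -- no entity matches anywhere: both return None
    simp only [not_exists, ne_eq, not_not] at hex
    have hA : find_first_entity_in_text_py text entities = none := by
      unfold find_first_entity_in_text_py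
      by_cases hnil : entities = []
      · rw [if_pos hnil]
      · rw [if_neg hnil]
        rw [pvFold_const text entities _ none ?_]
        intro e he hc
        have hne : PySem.Chars.find tl e.toList ≠ -1 := by
          have := hc.1
          simpa [PySem.Str.find_eq, ← htl] using this
        have hnn : 0 ≤ PySem.Chars.find tl e.toList := by
          have := PySem.Chars.neg_one_le_find tl e.toList
          omega
        have hspec := PySem.Chars.find_spec hnn
        exact (pvInnerB_ne_none tl _ entities e he hspec.1) (hex _)
    have hB : find_first_entity_in_text_py_alt text entities = none := by
      unfold find_first_entity_in_text_py_alt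
      rw [← htl]
      exact pvOuterB_none tl entities _ (fun i _ => hex i)
    rw [hA, hB]
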